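-- pv_equiv track=rewrite | github.com/ahmedMunna1767/Elements-Of-Programming-Interviews-in-Python | Primitives, Chapter 4/parity.py | parity_4
-- ===== SOURCE A (Python) =====
-- PRECOMPUTED_PARITY = {
--     0 : 0,
--     1 : 1,
--     2 : 1,
--     3 : 0,
--     4 : 1,
--     5 : 0,
--     6 : 0,
--     7 : 1,
--     8 : 1,
--     9 : 0,
--     10 : 0,
--     11 : 1,
--     12 : 0,
--     13 : 1,
--     14 : 1,
--     15 : 0
-- }
--
-- def parity_4(x : int) -> int:
--     MASK_SIZE = 4
--     BIT_MASK = 0xF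
--     no_of_chunks = 64 // MASK_SIZE
--     result = 0
--     for i in range(no_of_chunks):
--         if i == 0:
--             chunk_result = PRECOMPUTED_PARITY[x & BIT_MASK]
--         elif i == no_of_chunks:
--             chunk_result = PRECOMPUTED_PARITY[x >> (i * MASK_SIZE)]
--         else:
--             chunk_result = PRECOMPUTED_PARITY[x >> (i * MASK_SIZE) & BIT_MASK]
--         result = result ^ chunk_result
--     return result
-- ===== SOURCE B (Python) =====
-- def parity_4(x: int) -> int:
--     x &= (1 << 64) - 1
--     x ^= x >> 32
--     x ^= x >> 16
--     x ^= x >> 8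
--     x ^= x >> 4
--     x ^= x >> 2
--     x ^= x >> 1
--     return x & 1
-- ===== Notes on version B (the rewrite author's own statement) =====
-- stated objective: idiomatic
-- what changed: Replaces the sixteen-iteration nibble-chunk loop over a precomputed lookup table by a branch-free XOR shift-fold of the low sixty-four bits (mask, six shift-xor halving steps, then take the lowest bit).
import Mathlib
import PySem

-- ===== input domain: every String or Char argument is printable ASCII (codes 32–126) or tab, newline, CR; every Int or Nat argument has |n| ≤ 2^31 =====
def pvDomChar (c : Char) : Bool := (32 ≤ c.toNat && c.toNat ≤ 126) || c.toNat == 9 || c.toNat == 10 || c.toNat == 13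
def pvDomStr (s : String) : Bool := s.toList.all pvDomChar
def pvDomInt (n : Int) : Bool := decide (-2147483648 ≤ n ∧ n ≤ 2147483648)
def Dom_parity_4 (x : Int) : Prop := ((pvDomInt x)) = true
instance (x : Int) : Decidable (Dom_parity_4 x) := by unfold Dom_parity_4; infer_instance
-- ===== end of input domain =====

-- B replaces A's sixteen-iteration nibble-table loop by the branch-free XOR shift-fold of the
-- low sixty-four bits (mask, six shift-xor steps, lowest bit); proved equal for every Int input.

-- ===== PORT A =====
-- the module-level PRECOMPUTED_PARITY dict
def pvPRECOMPUTED_PARITY : PySem.Dict Int Int :=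
  PySem.Dict.ofList [(0,0),(1,1),(2,1),(3,0),(4,1),(5,0),(6,0),(7,1),
                     (8,1),(9,0),(10,0),(11,1),(12,0),(13,1),(14,1),(15,0)]

-- literal port of A. Notes on exactness: inside the loop i ∈ [0,16) so the shift amount
-- (i * MASK_SIZE).toNat equals Python's i * MASK_SIZE, and every dict key that is actually
-- looked up lies in [0,16) and is present, so `.getD 0` never supplies its default
-- (the `i = no_of_chunks` branch is dead code: range(no_of_chunks) never reaches it).
def parity_4 (x : Int) : Int :=
  let MASK_SIZE : Int := 4
  let BIT_MASK : Int := 0xF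
  let no_of_chunks : Int := PySem.Int.floordiv 64 MASK_SIZE
  (PySem.List.pyRange 0 no_of_chunks 1).foldl (fun result i =>
    let chunk_result :=
      if i = 0 then (pvPRECOMPUTED_PARITY.get? (PySem.Int.band x BIT_MASK)).getD 0
      else if i = no_of_chunks then (pvPRECOMPUTED_PARITY.get? (x >>> (i * MASK_SIZE).toNat)).getD 0
      else (pvPRECOMPUTED_PARITY.get? (PySem.Int.band (x >>> (i * MASK_SIZE).toNat) BIT_MASK)).getD 0
    PySem.Int.bxor result chunk_result) 0

-- ===== PORT B =====
-- literal port of Source B: mask to 64 bits, then fold x ^= x>>32 … x ^= x>>1, return x & 1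
def parity_4_alt (x : Int) : Int :=
  let x1 := PySem.Int.band x ((1 : Int) <<< (64 : Nat) - 1)
  let x2 := PySem.Int.bxor x1 (x1 >>> (32 : Nat))
  let x3 := PySem.Int.bxor x2 (x2 >>> (16 : Nat))
  let x4 := PySem.Int.bxor x3 (x3 >>> (8 : Nat))
  let x5 := PySem.Int.bxor x4 (x4 >>> (4 : Nat))
  let x6 := PySem.Int.bxor x5 (x5 >>> (2 : Nat))
  let x7 := PySem.Int.bxor x6 (x6 >>> (1 : Nat))
  PySem.Int.band x7 1

-- ===== PRECONDITION & SPEC =====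
-- A is total (every dict lookup it reaches hits a key in [0,16)), so there is no Pre_.
def Spec_parity_4 (x : Int) (out : Int) : Prop := out = parity_4_alt x
instance (x : Int) (out : Int) : Decidable (Spec_parity_4 x out) := by unfold Spec_parity_4; infer_instance

-- ===== CLAIM (what is proved, stated in full; the proofs are below) =====
def Claim_equal_parity_4 : Prop := ∀ (x : Int), Dom_parity_4 x → Spec_parity_4 x (parity_4 x)

-- ===== LEMMAS AND PROOFS =====
-- pvPar n is the parity of the number of one-bits of n; both ports are shown to compute
-- pvPar of the low sixty-four bits of x (as Int).
def pvPar (n : Nat) : Nat := PySem.Int.bitCount (n : Int) % 2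

theorem pvPar_lt (n : Nat) : pvPar n < 2 := Nat.mod_lt _ (by omega)

theorem pvPar_eq (n : Nat) : pvPar n = (n % 2 + pvPar (n / 2)) % 2 := by
  rcases Nat.eq_zero_or_pos n with h | h
  · subst h; decide
  · unfold pvPar
    rw [PySem.Int.bitCount_natCast h]
    omega

theorem pvBitXorMod (a b : Nat) : (a ^^^ b) % 2 = (a % 2 + b % 2) % 2 := by
  have h := @Nat.xor_mod_two_pow a b 1
  norm_num only at h
  rcases Nat.mod_two_eq_zero_or_one a with h1 | h1 <;>
    rcases Nat.mod_two_eq_zero_or_one b with h2 | h2 <;>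
      rw [h, h1, h2] <;> decide

theorem pvPar_xor (a b : Nat) : pvPar (a ^^^ b) = (pvPar a + pvPar b) % 2 := by
  induction a using Nat.strong_induction_on generalizing b with
  | _ a IH =>
    rcases Nat.eq_zero_or_pos a with h | h
    · subst h
      simp only [Nat.zero_xor]
      have := pvPar_lt b
      have h0 : pvPar 0 = 0 := by decide
      omega
    · rw [pvPar_eq (a ^^^ b), Nat.xor_div_two, IH (a/2) (by omega),
          pvBitXorMod, pvPar_eq a, pvPar_eq b]
      have h1 := pvPar_lt (a/2)
      have h2 := pvPar_lt (b/2)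
      omega

theorem pvPar_split (k a : Nat) : (pvPar (a % 2^k) + pvPar (a / 2^k)) % 2 = pvPar a := by
  induction k generalizing a with
  | zero =>
    simp only [pow_zero, Nat.mod_one, Nat.div_one]
    have := pvPar_lt a
    have h0 : pvPar 0 = 0 := by decide
    omega
  | succ k IH =>
    have e1 : a % 2^(k+1) % 2 = a % 2 :=
      Nat.mod_mod_of_dvd a ⟨2^k, by ring⟩
    have e2 : a % 2^(k+1) / 2 = a / 2 % 2^k := by
      have h2 : (2:Nat)^(k+1) = 2 * 2^k := by ring
      rw [h2, Nat.mod_mul_right_div_self]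
    have e3 : a / 2^(k+1) = a / 2 / 2^k := by
      rw [Nat.div_div_eq_div_mul]; congr 1; ring
    rw [pvPar_eq (a % 2^(k+1)), e1, e2, e3, pvPar_eq a]
    have h := IH (a/2)
    have h1 := pvPar_lt (a/2 % 2^k)
    have h2 := pvPar_lt (a/2/2^k)
    omega

theorem pvStep (k a : Nat) :
    pvPar ((a ^^^ (a >>> k)) % 2^k) = pvPar (a % (2^k * 2^k)) := by
  rw [Nat.xor_mod_two_pow, Nat.shiftRight_eq_div_pow, pvPar_xor]
  have e1 : a % (2^k * 2^k) % 2^k = a % 2^k :=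
    Nat.mod_mod_of_dvd a ⟨2^k, rfl⟩
  have e2 : a % (2^k * 2^k) / 2^k = a / 2^k % 2^k := Nat.mod_mul_right_div_self a _ _
  rw [← pvPar_split k (a % (2^k * 2^k)), e1, e2]

theorem pvLow (a : Nat) : a % 2 = pvPar (a % 2) := by
  rcases Nat.mod_two_eq_zero_or_one a with h | h <;> rw [h] <;> decide

theorem pvBand15 (a : Int) : PySem.Int.band a 15 = a % 16 := by
  by_cases h : 0 ≤ a
  · rw [PySem.Int.band_of_nonneg h (by norm_num)]
    have h15 : (15 : Int).toNat = 15 := rfl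
    rw [h15]
    have : a.toNat &&& 15 = a.toNat % 16 := Nat.and_two_pow_sub_one_eq_mod a.toNat 4
    rw [this]
    have ha : (a.toNat : Int) = a := Int.toNat_of_nonneg h
    omega
  · simp only [PySem.Int.band, h, if_false, show (0:Int) ≤ 15 by norm_num, if_pos]
    have h15 : (15 : Int).toNat = 15 := rfl
    rw [h15, Nat.and_comm]
    have : (-a - 1).toNat &&& 15 = (-a - 1).toNat % 16 := Nat.and_two_pow_sub_one_eq_mod _ 4
    rw [this]
    have ha : ((-a - 1).toNat : Int) = -a - 1 := Int.toNat_of_nonneg (by omega)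
    omega

theorem pvBandM (a : Int) :
    PySem.Int.band a 18446744073709551615 = a % 18446744073709551616 := by
  by_cases h : 0 ≤ a
  · rw [PySem.Int.band_of_nonneg h (by norm_num)]
    have h15 : (18446744073709551615 : Int).toNat = 18446744073709551615 := rfl
    rw [h15]
    have : a.toNat &&& 18446744073709551615 = a.toNat % 18446744073709551616 :=
      Nat.and_two_pow_sub_one_eq_mod a.toNat 64
    rw [this]
    have ha : (a.toNat : Int) = a := Int.toNat_of_nonneg h
    omega
  · simp only [PySem.Int.band, h, if_false,
      show (0:Int) ≤ 18446744073709551615 by norm_num, if_pos]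
    have h15 : (18446744073709551615 : Int).toNat = 18446744073709551615 := rfl
    rw [h15, Nat.and_comm]
    have : (-a - 1).toNat &&& 18446744073709551615 = (-a - 1).toNat % 18446744073709551616 :=
      Nat.and_two_pow_sub_one_eq_mod _ 64
    rw [this]
    have ha : ((-a - 1).toNat : Int) = -a - 1 := Int.toNat_of_nonneg (by omega)
    omega

theorem pvShiftCast (a k : Nat) : ((a : Int) >>> k) = ((a >>> k : Nat) : Int) := by
  rw [Int.shiftRight_eq_div_pow, Nat.shiftRight_eq_div_pow]
  push_cast
  rfl

theorem pvXor01 (a b : Nat) (ha : a < 2) (hb : b < 2) : a ^^^ b = (a + b) % 2 := by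
  interval_cases a <;> interval_cases b <;> decide

theorem pvSplit16 (a : Nat) : pvPar (a % 16) ^^^ pvPar (a / 16) = pvPar a := by
  have h := pvPar_split 4 a
  norm_num only at h
  rw [pvXor01 _ _ (pvPar_lt _) (pvPar_lt _)]
  exact h

theorem pvTable (c : Nat) (h : c < 16) :
    (pvPRECOMPUTED_PARITY.get? (c : Int)).getD 0 = ((pvPar c : Nat) : Int) := by
  interval_cases c <;> decide

theorem pvNatA (n : Nat) (h : n < 18446744073709551616) :
    (((((((((((((((pvPar (n % 16) ^^^ pvPar (n / 16 % 16)) ^^^ pvPar (n / 256 % 16)) ^^^ pvPar (n / 4096 % 16)) ^^^ pvPar (n / 65536 % 16)) ^^^ pvPar (n / 1048576 % 16)) ^^^ pvPar (n / 16777216 % 16)) ^^^ pvPar (n / 268435456 % 16)) ^^^ pvPar (n / 4294967296 % 16)) ^^^ pvPar (n / 68719476736 % 16)) ^^^ pvPar (n / 1099511627776 % 16)) ^^^ pvPar (n / 17592186044416 % 16)) ^^^ pvPar (n / 281474976710656 % 16)) ^^^ pvPar (n / 4503599627370496 % 16)) ^^^ pvPar (n / 72057594037927936 % 16)) ^^^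 pvPar (n / 1152921504606846976 % 16)) = pvPar n := by
  have s0 : pvPar (n % 16) ^^^ pvPar (n / 16) = pvPar n := pvSplit16 n
  have s1 : pvPar (n / 16 % 16) ^^^ pvPar (n / 256) = pvPar (n / 16) := by
    have h := pvSplit16 (n / 16)
    have e : n / 16 / 16 = n / 256 := by omega
    rw [e] at h; exact h
  have s2 : pvPar (n / 256 % 16) ^^^ pvPar (n / 4096) = pvPar (n / 256) := by
    have h := pvSplit16 (n / 256)
    have e : n / 256 / 16 = n / 4096 := by omega
    rw [e] at h; exact h
  have s3 : pvPar (n / 4096 % 16) ^^^ pvPar (n / 65536) = pvPar (n / 4096) := by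
    have h := pvSplit16 (n / 4096)
    have e : n / 4096 / 16 = n / 65536 := by omega
    rw [e] at h; exact h
  have s4 : pvPar (n / 65536 % 16) ^^^ pvPar (n / 1048576) = pvPar (n / 65536) := by
    have h := pvSplit16 (n / 65536)
    have e : n / 65536 / 16 = n / 1048576 := by omega
    rw [e] at h; exact h
  have s5 : pvPar (n / 1048576 % 16) ^^^ pvPar (n / 16777216) = pvPar (n / 1048576) := by
    have h := pvSplit16 (n / 1048576)
    have e : n / 1048576 / 16 = n / 16777216 := by omega
    rw [e] at h; exact h
  have s6 : pvPar (n / 16777216 % 16) ^^^ pvPar (n / 268435456) = pvPar (n / 16777216) := by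
    have h := pvSplit16 (n / 16777216)
    have e : n / 16777216 / 16 = n / 268435456 := by omega
    rw [e] at h; exact h
  have s7 : pvPar (n / 268435456 % 16) ^^^ pvPar (n / 4294967296) = pvPar (n / 268435456) := by
    have h := pvSplit16 (n / 268435456)
    have e : n / 268435456 / 16 = n / 4294967296 := by omega
    rw [e] at h; exact h
  have s8 : pvPar (n / 4294967296 % 16) ^^^ pvPar (n / 68719476736) = pvPar (n / 4294967296) := by
    have h := pvSplit16 (n / 4294967296)
    have e : n / 4294967296 / 16 = n / 68719476736 := by omega
    rw [e] at h; exact h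
  have s9 : pvPar (n / 68719476736 % 16) ^^^ pvPar (n / 1099511627776) = pvPar (n / 68719476736) := by
    have h := pvSplit16 (n / 68719476736)
    have e : n / 68719476736 / 16 = n / 1099511627776 := by omega
    rw [e] at h; exact h
  have s10 : pvPar (n / 1099511627776 % 16) ^^^ pvPar (n / 17592186044416) = pvPar (n / 1099511627776) := by
    have h := pvSplit16 (n / 1099511627776)
    have e : n / 1099511627776 / 16 = n / 17592186044416 := by omega
    rw [e] at h; exact h
  have s11 : pvPar (n / 17592186044416 % 16) ^^^ pvPar (n / 281474976710656) = pvPar (n / 17592186044416) := by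
    have h := pvSplit16 (n / 17592186044416)
    have e : n / 17592186044416 / 16 = n / 281474976710656 := by omega
    rw [e] at h; exact h
  have s12 : pvPar (n / 281474976710656 % 16) ^^^ pvPar (n / 4503599627370496) = pvPar (n / 281474976710656) := by
    have h := pvSplit16 (n / 281474976710656)
    have e : n / 281474976710656 / 16 = n / 4503599627370496 := by omega
    rw [e] at h; exact h
  have s13 : pvPar (n / 4503599627370496 % 16) ^^^ pvPar (n / 72057594037927936) = pvPar (n / 4503599627370496) := by
    have h := pvSplit16 (n / 4503599627370496)
    have e : n / 4503599627370496 / 16 = n / 72057594037927936 := by omega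
    rw [e] at h; exact h
  have s14 : pvPar (n / 72057594037927936 % 16) ^^^ pvPar (n / 1152921504606846976) = pvPar (n / 72057594037927936) := by
    have h := pvSplit16 (n / 72057594037927936)
    have e : n / 72057594037927936 / 16 = n / 1152921504606846976 := by omega
    rw [e] at h; exact h
  have s15 : pvPar (n / 1152921504606846976 % 16) ^^^ pvPar (n / 18446744073709551616) = pvPar (n / 1152921504606846976) := by
    have h := pvSplit16 (n / 1152921504606846976)
    have e : n / 1152921504606846976 / 16 = n / 18446744073709551616 := by omega
    rw [e] at h; exact h
  have s16 : pvPar (n / 18446744073709551616) = 0 := by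
    have e : n / 18446744073709551616 = 0 := by omega
    rw [e]; decide
  rw [← s0, ← s1, ← s2, ← s3, ← s4, ← s5, ← s6, ← s7, ← s8, ← s9, ← s10, ← s11, ← s12, ← s13, ← s14, ← s15, s16, Nat.xor_zero]
  simp only [Nat.xor_assoc]

theorem pvNatB (n : Nat) (h : n < 18446744073709551616) :
    ((((((n ^^^ n >>> 32) ^^^ (n ^^^ n >>> 32) >>> 16) ^^^ ((n ^^^ n >>> 32) ^^^ (n ^^^ n >>> 32) >>> 16) >>> 8) ^^^ (((n ^^^ n >>> 32) ^^^ (n ^^^ n >>> 32) >>> 16) ^^^ ((n ^^^ n >>> 32) ^^^ (n ^^^ n >>> 32) >>> 16) >>> 8) >>> 4) ^^^ ((((n ^^^ n >>> 32) ^^^ (n ^^^ n >>> 32) >>> 16) ^^^ ((n ^^^ n >>> 32) ^^^ (n ^^^ n >>> 32) >>> 16) >>> 8) ^^^ (((n ^^^ n >>> 32) ^^^ (n ^^^ n >>> 32) >>> 16) ^^^ ((n ^^^ n >>> 32) ^^^ (n ^^^ n >>> 32) >>> 16) >>> 8) >>> 4) >>> 2) ^^^ (((((n ^^^ n >>> 32)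 ^^^ (n ^^^ n >>> 32) >>> 16) ^^^ ((n ^^^ n >>> 32) ^^^ (n ^^^ n >>> 32) >>> 16) >>> 8) ^^^ (((n ^^^ n >>> 32) ^^^ (n ^^^ n >>> 32) >>> 16) ^^^ ((n ^^^ n >>> 32) ^^^ (n ^^^ n >>> 32) >>> 16) >>> 8) >>> 4) ^^^ ((((n ^^^ n >>> 32) ^^^ (n ^^^ n >>> 32) >>> 16) ^^^ ((n ^^^ n >>> 32) ^^^ (n ^^^ n >>> 32) >>> 16) >>> 8) ^^^ (((n ^^^ n >>> 32) ^^^ (n ^^^ n >>> 32) >>> 16) ^^^ ((n ^^^ n >>> 32) ^^^ (n ^^^ n >>> 32) >>> 16) >>> 8) >>> 4) >>> 2) >>> 1) % 2 = pvPar n := by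
  have g1 : ∀ a : Nat, pvPar ((a ^^^ a >>> 1) % 2) = pvPar (a % 4) := by
    intro a
    have h := pvStep 1 a
    norm_num only at h
    exact h
  have g2 : ∀ a : Nat, pvPar ((a ^^^ a >>> 2) % 4) = pvPar (a % 16) := by
    intro a
    have h := pvStep 2 a
    norm_num only at h
    exact h
  have g4 : ∀ a : Nat, pvPar ((a ^^^ a >>> 4) % 16) = pvPar (a % 256) := by
    intro a
    have h := pvStep 4 a
    norm_num only at h
    exact h
  have g8 : ∀ a : Nat, pvPar ((a ^^^ a >>> 8) % 256) = pvPar (a % 65536) := by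
    intro a
    have h := pvStep 8 a
    norm_num only at h
    exact h
  have g16 : ∀ a : Nat, pvPar ((a ^^^ a >>> 16) % 65536) = pvPar (a % 4294967296) := by
    intro a
    have h := pvStep 16 a
    norm_num only at h
    exact h
  have g32 : ∀ a : Nat, pvPar ((a ^^^ a >>> 32) % 4294967296) = pvPar (a % 18446744073709551616) := by
    intro a
    have h := pvStep 32 a
    norm_num only at h
    exact h
  calc ((((((n ^^^ n >>> 32) ^^^ (n ^^^ n >>> 32) >>> 16) ^^^ ((n ^^^ n >>> 32) ^^^ (n ^^^ n >>> 32) >>> 16) >>> 8) ^^^ (((n ^^^ n >>> 32) ^^^ (n ^^^ n >>> 32) >>> 16) ^^^ ((n ^^^ n >>> 32) ^^^ (n ^^^ n >>> 32) >>> 16) >>> 8) >>> 4) ^^^ ((((n ^^^ n >>> 32) ^^^ (n ^^^ n >>> 32) >>> 16) ^^^ ((n ^^^ n >>> 32) ^^^ (n ^^^ n >>> 32) >>> 16) >>> 8) ^^^ (((n ^^^ n >>> 32) ^^^ (n ^^^ n >>> 32) >>> 16) ^^^ ((n ^^^ n >>> 32) ^^^ (n ^^^ n >>> 32) >>> 16)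 >>> 8) >>> 4) >>> 2) ^^^ (((((n ^^^ n >>> 32) ^^^ (n ^^^ n >>> 32) >>> 16) ^^^ ((n ^^^ n >>> 32) ^^^ (n ^^^ n >>> 32) >>> 16) >>> 8) ^^^ (((n ^^^ n >>> 32) ^^^ (n ^^^ n >>> 32) >>> 16) ^^^ ((n ^^^ n >>> 32) ^^^ (n ^^^ n >>> 32) >>> 16) >>> 8) >>> 4) ^^^ ((((n ^^^ n >>> 32) ^^^ (n ^^^ n >>> 32) >>> 16) ^^^ ((n ^^^ n >>> 32) ^^^ (n ^^^ n >>> 32) >>> 16) >>> 8) ^^^ (((n ^^^ n >>> 32) ^^^ (n ^^^ n >>> 32) >>> 16) ^^^ ((n ^^^ n >>> 32) ^^^ (n ^^^ n >>> 32) >>> 16) >>> 8) >>> 4) >>> 2) >>> 1) % 2 = pvPar (((((((n ^^^ n >>> 32) ^^^ (n ^^^ n >>> 32) >>> 16) ^^^ ((n ^^^ n >>> 32) ^^^ (n ^^^ n >>> 32) >>> 16) >>> 8) ^^^ (((n ^^^ n >>> 32) ^^^ (n ^^^ n >>> 32) >>> 16) ^^^ ((n ^^^ n >>> 32) ^^^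 (n ^^^ n >>> 32) >>> 16) >>> 8) >>> 4) ^^^ ((((n ^^^ n >>> 32) ^^^ (n ^^^ n >>> 32) >>> 16) ^^^ ((n ^^^ n >>> 32) ^^^ (n ^^^ n >>> 32) >>> 16) >>> 8) ^^^ (((n ^^^ n >>> 32) ^^^ (n ^^^ n >>> 32) >>> 16) ^^^ ((n ^^^ n >>> 32) ^^^ (n ^^^ n >>> 32) >>> 16) >>> 8) >>> 4) >>> 2) ^^^ (((((n ^^^ n >>> 32) ^^^ (n ^^^ n >>> 32) >>> 16) ^^^ ((n ^^^ n >>> 32) ^^^ (n ^^^ n >>> 32) >>> 16) >>> 8) ^^^ (((n ^^^ n >>> 32) ^^^ (n ^^^ n >>> 32) >>> 16) ^^^ ((n ^^^ n >>> 32) ^^^ (n ^^^ n >>> 32) >>> 16) >>> 8) >>> 4) ^^^ ((((n ^^^ n >>> 32) ^^^ (n ^^^ n >>> 32) >>> 16) ^^^ ((n ^^^ n >>> 32) ^^^ (n ^^^ n >>> 32) >>> 16) >>> 8) ^^^ (((n ^^^ n >>> 32) ^^^ (n ^^^ n >>> 32) >>> 16) ^^^ ((n ^^^ n >>> 32) ^^^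 (n ^^^ n >>> 32) >>> 16) >>> 8) >>> 4) >>> 2) >>> 1) % 2) := pvLow _
    _ = pvPar ((((((n ^^^ n >>> 32) ^^^ (n ^^^ n >>> 32) >>> 16) ^^^ ((n ^^^ n >>> 32) ^^^ (n ^^^ n >>> 32) >>> 16) >>> 8) ^^^ (((n ^^^ n >>> 32) ^^^ (n ^^^ n >>> 32) >>> 16) ^^^ ((n ^^^ n >>> 32) ^^^ (n ^^^ n >>> 32) >>> 16) >>> 8) >>> 4) ^^^ ((((n ^^^ n >>> 32) ^^^ (n ^^^ n >>> 32) >>> 16) ^^^ ((n ^^^ n >>> 32) ^^^ (n ^^^ n >>> 32) >>> 16) >>> 8) ^^^ (((n ^^^ n >>> 32) ^^^ (n ^^^ n >>> 32) >>> 16) ^^^ ((n ^^^ n >>> 32) ^^^ (n ^^^ n >>> 32) >>> 16) >>> 8) >>> 4) >>> 2) % 4) := g1 (((((n ^^^ n >>> 32) ^^^ (n ^^^ n >>> 32) >>> 16) ^^^ ((n ^^^ n >>> 32) ^^^ (n ^^^ n >>> 32) >>> 16) >>> 8) ^^^ (((n ^^^ n >>> 32) ^^^ (n ^^^ n >>>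 32) >>> 16) ^^^ ((n ^^^ n >>> 32) ^^^ (n ^^^ n >>> 32) >>> 16) >>> 8) >>> 4) ^^^ ((((n ^^^ n >>> 32) ^^^ (n ^^^ n >>> 32) >>> 16) ^^^ ((n ^^^ n >>> 32) ^^^ (n ^^^ n >>> 32) >>> 16) >>> 8) ^^^ (((n ^^^ n >>> 32) ^^^ (n ^^^ n >>> 32) >>> 16) ^^^ ((n ^^^ n >>> 32) ^^^ (n ^^^ n >>> 32) >>> 16) >>> 8) >>> 4) >>> 2)
    _ = pvPar (((((n ^^^ n >>> 32) ^^^ (n ^^^ n >>> 32) >>> 16) ^^^ ((n ^^^ n >>> 32) ^^^ (n ^^^ n >>> 32) >>> 16) >>> 8) ^^^ (((n ^^^ n >>> 32) ^^^ (n ^^^ n >>> 32) >>> 16) ^^^ ((n ^^^ n >>> 32) ^^^ (n ^^^ n >>> 32) >>> 16) >>> 8) >>> 4) % 16) := g2 ((((n ^^^ n >>> 32) ^^^ (n ^^^ n >>> 32) >>> 16) ^^^ ((n ^^^ n >>> 32) ^^^ (n ^^^ n >>> 32) >>> 16) >>> 8) ^^^ (((n ^^^ n >>> 32) ^^^ (n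 ^^^ n >>> 32) >>> 16) ^^^ ((n ^^^ n >>> 32) ^^^ (n ^^^ n >>> 32) >>> 16) >>> 8) >>> 4)
    _ = pvPar ((((n ^^^ n >>> 32) ^^^ (n ^^^ n >>> 32) >>> 16) ^^^ ((n ^^^ n >>> 32) ^^^ (n ^^^ n >>> 32) >>> 16) >>> 8) % 256) := g4 (((n ^^^ n >>> 32) ^^^ (n ^^^ n >>> 32) >>> 16) ^^^ ((n ^^^ n >>> 32) ^^^ (n ^^^ n >>> 32) >>> 16) >>> 8)
    _ = pvPar (((n ^^^ n >>> 32) ^^^ (n ^^^ n >>> 32) >>> 16) % 65536) := g8 ((n ^^^ n >>> 32) ^^^ (n ^^^ n >>> 32) >>> 16)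
    _ = pvPar ((n ^^^ n >>> 32) % 4294967296) := g16 (n ^^^ n >>> 32)
    _ = pvPar (n % 18446744073709551616) := g32 n
    _ = pvPar n := by rw [Nat.mod_eq_of_lt h]

theorem pvBxorZero (a : Int) : PySem.Int.bxor 0 a = a := by
  rw [PySem.Int.bxor_comm, PySem.Int.bxor_zero]

theorem pvA (x : Int) (n : Nat) (hn : (n : Int) = x % 18446744073709551616) :
    parity_4 x = (((((((((((((((((pvPar (n % 16) ^^^ pvPar (n / 16 % 16)) ^^^ pvPar (n / 256 % 16)) ^^^ pvPar (n / 4096 % 16)) ^^^ pvPar (n / 65536 % 16)) ^^^ pvPar (n / 1048576 % 16)) ^^^ pvPar (n / 16777216 % 16)) ^^^ pvPar (n / 268435456 % 16)) ^^^ pvPar (n / 4294967296 % 16)) ^^^ pvPar (n / 68719476736 % 16)) ^^^ pvPar (n / 1099511627776 % 16)) ^^^ pvPar (n / 17592186044416 % 16)) ^^^ pvPar (n / 281474976710656 % 16)) ^^^ pvPar (n / 4503599627370496 % 16)) ^^^ pvPar (n / 72057594037927936 % 16)) ^^^ pvPar (n / 1152921504606846976 % 16)) : Nat) : Int) := by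
  have hr : PySem.List.pyRange 0 16 1
      = [0,1,2,3,4,5,6,7,8,9,10,11,12,13,14,15] := by decide
  have hc4 : PySem.Int.band (x >>> (4:Nat)) 15 = ((n / 16 % 16 : Nat) : Int) := by
    rw [pvBand15, Int.shiftRight_eq_div_pow]; push_cast; omega
  have hc8 : PySem.Int.band (x >>> (8:Nat)) 15 = ((n / 256 % 16 : Nat) : Int) := by
    rw [pvBand15, Int.shiftRight_eq_div_pow]; push_cast; omega
  have hc12 : PySem.Int.band (x >>> (12:Nat)) 15 = ((n / 4096 % 16 : Nat) : Int) := by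
    rw [pvBand15, Int.shiftRight_eq_div_pow]; push_cast; omega
  have hc16 : PySem.Int.band (x >>> (16:Nat)) 15 = ((n / 65536 % 16 : Nat) : Int) := by
    rw [pvBand15, Int.shiftRight_eq_div_pow]; push_cast; omega
  have hc20 : PySem.Int.band (x >>> (20:Nat)) 15 = ((n / 1048576 % 16 : Nat) : Int) := by
    rw [pvBand15, Int.shiftRight_eq_div_pow]; push_cast; omega
  have hc24 : PySem.Int.band (x >>> (24:Nat)) 15 = ((n / 16777216 % 16 : Nat) : Int) := by
    rw [pvBand15, Int.shiftRight_eq_div_pow]; push_cast; omega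
  have hc28 : PySem.Int.band (x >>> (28:Nat)) 15 = ((n / 268435456 % 16 : Nat) : Int) := by
    rw [pvBand15, Int.shiftRight_eq_div_pow]; push_cast; omega
  have hc32 : PySem.Int.band (x >>> (32:Nat)) 15 = ((n / 4294967296 % 16 : Nat) : Int) := by
    rw [pvBand15, Int.shiftRight_eq_div_pow]; push_cast; omega
  have hc36 : PySem.Int.band (x >>> (36:Nat)) 15 = ((n / 68719476736 % 16 : Nat) : Int) := by
    rw [pvBand15, Int.shiftRight_eq_div_pow]; push_cast; omega
  have hc40 : PySem.Int.band (x >>> (40:Nat)) 15 = ((n / 1099511627776 % 16 : Nat) : Int) := by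
    rw [pvBand15, Int.shiftRight_eq_div_pow]; push_cast; omega
  have hc44 : PySem.Int.band (x >>> (44:Nat)) 15 = ((n / 17592186044416 % 16 : Nat) : Int) := by
    rw [pvBand15, Int.shiftRight_eq_div_pow]; push_cast; omega
  have hc48 : PySem.Int.band (x >>> (48:Nat)) 15 = ((n / 281474976710656 % 16 : Nat) : Int) := by
    rw [pvBand15, Int.shiftRight_eq_div_pow]; push_cast; omega
  have hc52 : PySem.Int.band (x >>> (52:Nat)) 15 = ((n / 4503599627370496 % 16 : Nat) : Int) := by
    rw [pvBand15, Int.shiftRight_eq_div_pow]; push_cast; omega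
  have hc56 : PySem.Int.band (x >>> (56:Nat)) 15 = ((n / 72057594037927936 % 16 : Nat) : Int) := by
    rw [pvBand15, Int.shiftRight_eq_div_pow]; push_cast; omega
  have hc60 : PySem.Int.band (x >>> (60:Nat)) 15 = ((n / 1152921504606846976 % 16 : Nat) : Int) := by
    rw [pvBand15, Int.shiftRight_eq_div_pow]; push_cast; omega
  have hc0 : PySem.Int.band x 15 = ((n % 16 : Nat) : Int) := by
    rw [pvBand15]; push_cast; omega
  have hf : PySem.Int.floordiv 64 4 = 16 := by decide
  simp only [parity_4, hf, hr, List.foldl]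
  simp only [Int.reduceMul, Int.reduceToNat, Int.reduceEq, reduceIte]
  rw [hc0, hc4, hc8, hc12, hc16, hc20, hc24, hc28, hc32, hc36, hc40, hc44, hc48, hc52, hc56, hc60]
  rw [pvTable _ (Nat.mod_lt _ (by norm_num))]
  rw [pvTable (n / 16 % 16) (Nat.mod_lt _ (by norm_num))]
  rw [pvTable (n / 256 % 16) (Nat.mod_lt _ (by norm_num))]
  rw [pvTable (n / 4096 % 16) (Nat.mod_lt _ (by norm_num))]
  rw [pvTable (n / 65536 % 16) (Nat.mod_lt _ (by norm_num))]
  rw [pvTable (n / 1048576 % 16) (Nat.mod_lt _ (by norm_num))]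
  rw [pvTable (n / 16777216 % 16) (Nat.mod_lt _ (by norm_num))]
  rw [pvTable (n / 268435456 % 16) (Nat.mod_lt _ (by norm_num))]
  rw [pvTable (n / 4294967296 % 16) (Nat.mod_lt _ (by norm_num))]
  rw [pvTable (n / 68719476736 % 16) (Nat.mod_lt _ (by norm_num))]
  rw [pvTable (n / 1099511627776 % 16) (Nat.mod_lt _ (by norm_num))]
  rw [pvTable (n / 17592186044416 % 16) (Nat.mod_lt _ (by norm_num))]
  rw [pvTable (n / 281474976710656 % 16) (Nat.mod_lt _ (by norm_num))]
  rw [pvTable (n / 4503599627370496 % 16) (Nat.mod_lt _ (by norm_num))]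
  rw [pvTable (n / 72057594037927936 % 16) (Nat.mod_lt _ (by norm_num))]
  rw [pvTable (n / 1152921504606846976 % 16) (Nat.mod_lt _ (by norm_num))]
  rw [pvBxorZero]
  simp only [PySem.Int.bxor_natCast]

theorem pvB (x : Int) (n : Nat) (hn : (n : Int) = x % 18446744073709551616) :
    parity_4_alt x = ((((((((n ^^^ n >>> 32) ^^^ (n ^^^ n >>> 32) >>> 16) ^^^ ((n ^^^ n >>> 32) ^^^ (n ^^^ n >>> 32) >>> 16) >>> 8) ^^^ (((n ^^^ n >>> 32) ^^^ (n ^^^ n >>> 32) >>> 16) ^^^ ((n ^^^ n >>> 32) ^^^ (n ^^^ n >>> 32) >>> 16) >>> 8) >>> 4) ^^^ ((((n ^^^ n >>> 32) ^^^ (n ^^^ n >>> 32) >>> 16) ^^^ ((n ^^^ n >>> 32) ^^^ (n ^^^ n >>> 32) >>> 16) >>> 8) ^^^ (((n ^^^ n >>> 32) ^^^ (n ^^^ n >>> 32) >>> 16) ^^^ ((n ^^^ n >>> 32) ^^^ (n ^^^ n >>> 32) >>> 16) >>> 8) >>> 4) >>> 2) ^^^ (((((n ^^^ n >>> 32) ^^^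 (n ^^^ n >>> 32) >>> 16) ^^^ ((n ^^^ n >>> 32) ^^^ (n ^^^ n >>> 32) >>> 16) >>> 8) ^^^ (((n ^^^ n >>> 32) ^^^ (n ^^^ n >>> 32) >>> 16) ^^^ ((n ^^^ n >>> 32) ^^^ (n ^^^ n >>> 32) >>> 16) >>> 8) >>> 4) ^^^ ((((n ^^^ n >>> 32) ^^^ (n ^^^ n >>> 32) >>> 16) ^^^ ((n ^^^ n >>> 32) ^^^ (n ^^^ n >>> 32) >>> 16) >>> 8) ^^^ (((n ^^^ n >>> 32) ^^^ (n ^^^ n >>> 32) >>> 16) ^^^ ((n ^^^ n >>> 32) ^^^ (n ^^^ n >>> 32) >>> 16) >>> 8) >>> 4) >>> 2) >>> 1) % 2 : Nat) : Int) := by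
  have hmask : (1 : Int) <<< (64 : Nat) - 1 = 18446744073709551615 := by decide
  simp only [parity_4_alt, hmask, pvBandM, ← hn]
  simp only [pvShiftCast, PySem.Int.bxor_natCast]
  rw [PySem.Int.band_one]
  exact_mod_cast PySem.Int.mod_natCast _ 2

theorem pvMainEq (x : Int) : parity_4 x = parity_4_alt x := by
  have hnn : 0 ≤ x % 18446744073709551616 := Int.emod_nonneg x (by norm_num)
  have hn : (((x % 18446744073709551616).toNat : Nat) : Int) = x % 18446744073709551616 :=
    Int.toNat_of_nonneg hnn
  have hlt : (x % 18446744073709551616).toNat < 18446744073709551616 := by omega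
  rw [pvA x _ hn, pvB x _ hn, Int.natCast_inj,
      pvNatA _ hlt, pvNatB _ hlt]

-- ===== VERDICT (by name: the statement is the Claim_ definition above) =====
theorem parity_4_spec : Claim_equal_parity_4 := by
  intro x _
  exact pvMainEq x
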